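-- pv_equiv track=rewrite | github.com/LuminiteTime/Tournabot | app/distribution.py | distribute_snake
-- ===== SOURCE A (Python) =====
-- def distribute_snake(players: list[str], table_sizes: list[int]) -> list[list[str]]:
--     """
--     Распределить игроков змейкой по таблицам.
--
--     Параметры:
--         players: список имён в порядке рейтинга / ввода
--         table_sizes: размеры таблиц (будут отсортированы по убыванию)
--
--     Возвращает:
--         Список таблиц, каждая — список имён игроков по позициям.
--     """
--     sorted_sizes = sorted(table_sizes, reverse=True)
--     num_tables = len(sorted_sizes)
--     tables: list[list[str]] = [[] for _ in range(num_tables)]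
--
--     player_idx = 0
--     total = len(players)
--     forward = True
--
--     while player_idx < total:
--         indices = range(num_tables) if forward else range(num_tables - 1, -1, -1)
--         for t in indices:
--             if player_idx >= total:
--                 break
--             # Добавляем только если в таблице ещё есть место
--             if len(tables[t]) < sorted_sizes[t]:
--                 tables[t].append(players[player_idx])
--                 player_idx += 1
--         forward = not forward
--
--     return tables
-- ===== SOURCE B (Python) =====
-- def distribute_snake(players: list[str], table_sizes: list[int]) -> list[list[str]]:
--     """Table-major construction: instead of simulating the snake seat by seat, compute the
--     round widths (conjugate of the size multiset, via a counter) and their prefix sums, then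
--     fill each table directly -- the player landing at table t in round r has the closed-form
--     global index starts[r] + (t if r even else widths[r]-1-t)."""
--     sizes = sorted(table_sizes, reverse=True)
--     n = len(players)
--     cnt = {}
--     for s in sizes:
--         cnt[s] = cnt.get(s, 0) + 1
--     k = sum(1 for s in sizes if s > 0)   # number of tables open in round 0
--     starts = []   # starts[r]: global index of round r's first seat
--     widths = []   # widths[r]: number of open tables in round r
--     total_seats = 0
--     r = 0
--     while k > 0 and total_seats < n:
--         starts.append(total_seats)
--         widths.append(k)
--         total_seats += k
--         r += 1
--         k -= cnt.get(r, 0)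
--     tables = []
--     for t, size in enumerate(sizes):
--         row = []
--         for r in range(len(starts)):
--             if r >= size:
--                 break
--             i = starts[r] + (t if r % 2 == 0 else widths[r] - 1 - t)
--             if i < n:
--                 row.append(players[i])
--         tables.append(row)
--     return tables
-- ===== Notes on version B (the rewrite author's own statement) =====
-- stated objective: alternative
-- what changed: A simulates the snake seat by seat, sweeping all tables once per round and testing len(table) < size for each; B never simulates: it builds the round widths (the conjugate of the size multiset, via a counter dict) and their prefix sums, then constructs each table directly from the closed-form global index of each of its seats (table-major instead of round-major order).
import Mathlib
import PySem

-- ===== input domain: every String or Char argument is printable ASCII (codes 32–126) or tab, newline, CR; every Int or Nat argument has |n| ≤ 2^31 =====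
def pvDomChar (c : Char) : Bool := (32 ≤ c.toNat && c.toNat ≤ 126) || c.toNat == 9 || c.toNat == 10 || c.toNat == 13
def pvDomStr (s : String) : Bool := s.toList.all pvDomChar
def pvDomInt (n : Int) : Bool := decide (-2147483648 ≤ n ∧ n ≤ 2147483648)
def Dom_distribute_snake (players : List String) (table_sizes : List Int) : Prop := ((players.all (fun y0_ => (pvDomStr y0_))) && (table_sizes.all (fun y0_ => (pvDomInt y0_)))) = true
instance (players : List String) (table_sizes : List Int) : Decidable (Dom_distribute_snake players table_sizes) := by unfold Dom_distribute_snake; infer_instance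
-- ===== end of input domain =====

-- B abandons A's seat-by-seat snake simulation: it computes the round widths (the conjugate of
-- the size multiset, via a counter dict) and their prefix sums, then fills each TABLE
-- directly from the closed-form global index of each of its seats (table-major, not
-- round-major).  Python A never returns when the players outnumber the total positive
-- capacity (its while-loop spins); both ports are made total by a fuel of len(players)
-- passes and are proved equal on ALL inputs (where Python A returns, the fuel suffices).

-- ===== PORT A =====
-- one step of A's inner `for t in indices` loop; the `if player_idx >= total: break` leaves the
-- state unchanged for the remaining indices, so it is ported as a state-preserving guard per index
def pvStepA (sizes : List Int) (total : Nat) (players : List String)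
    (st : List (List String) × Nat) (t : Nat) : List (List String) × Nat :=
  if st.2 ≥ total then st
  else if ((st.1.getD t []).length : Int) < sizes.getD t 0 then
    -- players[player_idx] is in range here since st.2 < total = players.length
    (st.1.modify t (· ++ [players.getD st.2 ""]), st.2 + 1)
  else st

-- A's `while player_idx < total` loop; fuel = total passes: whenever Python A terminates, every
-- executed pass seats at least one player, so the fuel is never exhausted there (where the Python
-- loops forever — players beyond the total positive capacity — the fuel runs out and the tables
-- so far are returned)
def pvLoopA (sizes : List Int) (numTables total : Nat) (players : List String) :
    Nat → Bool → List (List String) × Nat → List (List String)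
  | 0, _, st => st.1
  | fuel+1, forward, st =>
    if st.2 < total then
      -- range(num_tables) / range(num_tables-1,-1,-1) are exactly these index sequences
      pvLoopA sizes numTables total players fuel (!forward)
        ((if forward then List.range numTables else (List.range numTables).reverse).foldl
          (pvStepA sizes total players) st)
    else st.1

def distribute_snake (players : List String) (table_sizes : List Int) : List (List String) :=
  let sortedSizes := PySem.List.sorted table_sizes (fun x => x) true
  let numTables := sortedSizes.length
  let tables := List.replicate numTables ([] : List String)
  pvLoopA sortedSizes numTables players.length players players.length true (tables, 0)

-- ===== PORT B =====
-- Source B's `while k > 0 and total_seats < n` round-building loop; fuel = n passes suffices: each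
-- executed pass adds k ≥ 1 to total_seats, so at most n passes run before total_seats ≥ n
def pvBuildRounds (cnt : PySem.Dict Int Int) (n : Nat) :
    Nat → Int → Int → Int → List Int × List Int → List Int × List Int
  | 0, _, _, _, acc => acc
  | fuel+1, k, s, r, acc =>
    if 0 < k ∧ s < (n : Int) then
      pvBuildRounds cnt n fuel (k - cnt.getD (r+1) 0) (s + k) (r+1) (acc.1 ++ [s], acc.2 ++ [k])
    else acc

-- Source B's inner `for r in range(len(starts))` loop; the `break` once r ≥ size is ported as a
-- per-round guard, which is exact because the break condition is monotone in r
def pvRowB (players : List String) (n : Nat) (starts widths : List Int)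
    (t : Int) (size : Int) : List String :=
  (List.range starts.length).foldl (fun row (r : Nat) =>
    if (r : Int) ≥ size then row
    else
      let i := starts.getD r 0 + (if r % 2 = 0 then t else widths.getD r 0 - 1 - t)
      if i < (n : Int) then row ++ [players.getD i.toNat ""] else row) []

def distribute_snake_alt (players : List String) (table_sizes : List Int) : List (List String) :=
  let sizes := PySem.List.sorted table_sizes (fun x => x) true
  let n := players.length
  let cnt := sizes.foldl (fun d s => d.insert s (d.getD s 0 + 1)) PySem.Dict.empty
  let k0 := sizes.foldl (fun a s => if 0 < s then a + 1 else a) (0 : Int)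
  let sw := pvBuildRounds cnt n n k0 0 0 ([], [])
  (PySem.List.enumerate sizes).map (fun p => pvRowB players n sw.1 sw.2 p.1 p.2)

-- ===== PRECONDITION & SPEC =====
def Spec_distribute_snake (players : List String) (table_sizes : List Int) (out : List (List String)) : Prop := out = distribute_snake_alt players table_sizes
instance (players : List String) (table_sizes : List Int) (out : List (List String)) : Decidable (Spec_distribute_snake players table_sizes out) := by unfold Spec_distribute_snake; infer_instance

-- ===== CLAIM (what is proved, stated in full; the proofs are below) =====
def Claim_equal_distribute_snake : Prop := ∀ (players : List String) (table_sizes : List Int), Dom_distribute_snake players table_sizes → Spec_distribute_snake players table_sizes (distribute_snake players table_sizes)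

-- ===== LEMMAS AND PROOFS =====

-- k_r: number of tables still open in round r (sizes strictly larger than r)
def pvK (sizes : List Int) (r : Nat) : Nat := sizes.countP (fun s => decide ((r : Int) < s))
-- S_r: global index of round r's first seat (prefix sum of the k_j)
def pvS (sizes : List Int) : Nat → Nat
  | 0 => 0
  | r+1 => pvS sizes r + pvK sizes r
-- closed-form global player index of the seat of table t in round r
def pvIdx (sizes : List Int) (r t : Nat) : Nat :=
  pvS sizes r + (if r % 2 = 0 then t else pvK sizes r - 1 - t)
-- the first R rounds' contribution to table t (the shape of pvRowB, over pvS/pvK)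
def pvRowF (sizes : List Int) (players : List String) (n R t : Nat) : List String :=
  (List.range R).foldl (fun row (r : Nat) =>
    if (r : Int) ≥ sizes.getD t 0 then row
    else if pvIdx sizes r t < n then row ++ [players.getD (pvIdx sizes r t) ""] else row) []
-- the filling process is finished after round r
def pvStop (sizes : List Int) (n r : Nat) : Prop := pvK sizes r = 0 ∨ n ≤ pvS sizes r

theorem pvK_le_length (sizes : List Int) (r : Nat) : pvK sizes r ≤ sizes.length :=
  List.countP_le_length

theorem pvK_anti (sizes : List Int) {r r' : Nat} (h : r ≤ r') : pvK sizes r' ≤ pvK sizes r := by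
  unfold pvK
  apply List.countP_mono_left
  intro x _ hx
  simp only [decide_eq_true_eq] at hx ⊢
  omega

theorem pvS_mono (sizes : List Int) {r r' : Nat} (h : r ≤ r') : pvS sizes r ≤ pvS sizes r' := by
  obtain ⟨d, rfl⟩ := Nat.exists_eq_add_of_le h
  clear h
  induction d with
  | zero => exact le_rfl
  | succ d ih =>
    have h1 : pvS sizes (r + (d + 1)) = pvS sizes (r + d) + pvK sizes (r + d) := rfl
    omega

theorem pvStop_mono (sizes : List Int) (n : Nat) {r r' : Nat} (h : r ≤ r')
    (hs : pvStop sizes n r) : pvStop sizes n r' := by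
  rcases hs with hk | hn
  · exact Or.inl (by have := pvK_anti sizes h; omega)
  · exact Or.inr (le_trans hn (pvS_mono sizes h))

-- on a descending list, round r is open at table t iff t lies below the count k_r
theorem pvK_iff (sizes : List Int) (hp : sizes.Pairwise (fun a b => b ≤ a)) (r : Nat) :
    ∀ t : Nat, ((r : Int) < sizes.getD t 0 ↔ t < pvK sizes r) := by
  induction sizes with
  | nil => intro t; simp [pvK, List.getD]
  | cons x l ih =>
    have hxl : ∀ y ∈ l, y ≤ x := fun y hy => (List.pairwise_cons.mp hp).1 y hy
    have hpl : l.Pairwise (fun a b => b ≤ a) := (List.pairwise_cons.mp hp).2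
    intro t
    by_cases hx : (r : Int) < x
    · have hcnt : pvK (x :: l) r = pvK l r + 1 := by
        simp [pvK, List.countP_cons, hx]
      rw [hcnt]
      cases t with
      | zero => simp [List.getD_cons_zero, hx]
      | succ t => rw [List.getD_cons_succ, ih hpl t]; omega
    · have hcnt : pvK (x :: l) r = 0 := by
        apply List.countP_eq_zero.mpr
        intro y hy
        rcases List.mem_cons.mp hy with rfl | hyl
        · simpa using hx
        · have := hxl y hyl
          simp only [decide_eq_true_eq]
          omega
      rw [hcnt]
      simp only [Nat.not_lt_zero, iff_false]
      cases t with
      | zero => simpa [List.getD_cons_zero] using hx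
      | succ t =>
        rw [List.getD_cons_succ]
        by_cases ht : t < l.length
        · have hmem : l.getD t 0 ∈ l := by
            rw [List.getD_eq_getElem l 0 ht]; exact List.getElem_mem ht
          have := hxl _ hmem
          omega
        · rw [List.getD_eq_default l 0 (by omega)]
          omega

-- counting split: the tables open in round r are those open in round r+1 plus those of size r+1
theorem pvK_split (sizes : List Int) (r : Nat) :
    pvK sizes r = pvK sizes (r+1) + sizes.count ((r : Int) + 1) := by
  induction sizes with
  | nil => simp [pvK]
  | cons x l ih =>
    have hc : ((r + 1 : Nat) : Int) = (r : Int) + 1 := by push_cast; ring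
    simp only [pvK, List.countP_cons, List.count_cons] at *
    simp only [hc] at ih ⊢
    by_cases h1 : (r : Int) < x
    · by_cases h2 : ((r : Int) + 1) < x
      · have hne : ¬ (x = (r : Int) + 1) := by omega
        simp [h1, h2, hne]; omega
      · have heq : x = (r : Int) + 1 := by omega
        simp [h1, h2, heq]; omega
    · have h2 : ¬ ((r : Int) + 1) < x := by omega
      have hne : ¬ (x = (r : Int) + 1) := by omega
      simp [h1, h2, hne]; omega

-- the open test A performs on a table currently holding min r size players
theorem pv_open_iff (r : Nat) (sz : Int) :
    ((min r sz.toNat : Nat) : Int) < sz ↔ (r : Int) < sz := by omega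

theorem pv_getD_modify_ne (l : List (List String)) (i j : Nat) (f : List String → List String)
    (h : i ≠ j) : (l.modify i f).getD j [] = l.getD j [] := by
  simp [List.getD, h]

theorem pv_getD_modify_self (l : List (List String)) (i : Nat) (f : List String → List String)
    (h : i < l.length) : (l.modify i f).getD i [] = f (l.getD i []) := by
  simp [List.getD, h]

-- one more round appended to pvRowF
theorem pvRowF_succ (sizes : List Int) (players : List String) (n R t : Nat) :
    pvRowF sizes players n (R+1) t =
      if (R : Int) ≥ sizes.getD t 0 then pvRowF sizes players n R t
      else if pvIdx sizes R t < n
        then pvRowF sizes players n R t ++ [players.getD (pvIdx sizes R t) ""]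
        else pvRowF sizes players n R t := by
  simp [pvRowF, List.range_succ]

-- when no table is open in round r, every size is ≤ r (no sortedness needed)
theorem pvK_zero_le (sizes : List Int) {r : Nat} (hk : pvK sizes r = 0) (t : Nat) :
    sizes.getD t 0 ≤ (r : Int) := by
  by_cases ht : t < sizes.length
  · have hall := List.countP_eq_zero.mp hk
    have hmem : sizes.getD t 0 ∈ sizes := by
      rw [List.getD_eq_getElem sizes 0 ht]; exact List.getElem_mem ht
    have := hall _ hmem
    simp only [decide_eq_true_eq] at this
    omega
  · rw [List.getD_eq_default sizes 0 (by omega)]; omega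

-- once the filling has stopped, later rounds change no row
theorem pvRowF_stable (sizes : List Int) (players : List String) (n : Nat) {r r' : Nat}
    (hs : pvStop sizes n r) (h : r ≤ r') (t : Nat) :
    pvRowF sizes players n r' t = pvRowF sizes players n r t := by
  induction r' with
  | zero =>
    have : r = 0 := by omega
    rw [this]
  | succ m ih =>
    rcases Nat.lt_or_ge r (m+1) with hlt | hge
    · have hm : r ≤ m := by omega
      rw [pvRowF_succ, ih hm]
      rcases pvStop_mono sizes n hm hs with hk | hn
      · rw [if_pos (by have := pvK_zero_le sizes hk t; omega)]
      · have : pvS sizes m ≤ pvIdx sizes m t := Nat.le_add_right _ _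
        split
        · rfl
        · rw [if_neg (by omega)]
    · have : r = m + 1 := by omega
      rw [this]

-- while players remain, every open seat so far was filled: row t holds min r size players
theorem pvRowF_length (sizes : List Int) (players : List String) (n : Nat)
    (hp : sizes.Pairwise (fun a b => b ≤ a)) (t : Nat) :
    ∀ r : Nat, pvS sizes r < n →
      (pvRowF sizes players n r t).length = min r (sizes.getD t 0).toNat := by
  intro r
  induction r with
  | zero => intro _; simp [pvRowF]
  | succ m ih =>
    intro hSn
    have hSm : pvS sizes m < n := by
      have := pvS_mono sizes (show m ≤ m + 1 by omega); omega
    rw [pvRowF_succ]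
    by_cases hbr : (m : Int) ≥ sizes.getD t 0
    · rw [if_pos hbr, ih hSm]; omega
    · rw [if_neg hbr]
      have hopen : t < pvK sizes m := (pvK_iff sizes hp m t).mp (by omega)
      have hidx : pvIdx sizes m t < n := by
        have : pvIdx sizes m t < pvS sizes m + pvK sizes m := by
          unfold pvIdx; split <;> omega
        have hS1 : pvS sizes (m+1) = pvS sizes m + pvK sizes m := rfl
        omega
      rw [if_pos hidx]
      rw [List.length_append, ih hSm]
      simp only [List.length_cons, List.length_nil]
      omega

-- ===== the forward pass (round r even): A's fold over range' a m =====
theorem pv_passFwd (sizes : List Int) (n : Nat) (players : List String)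
    (hp : sizes.Pairwise (fun a b => b ≤ a)) (r : Nat) :
    ∀ (m a : Nat) (rows : List (List String)),
      rows.length = sizes.length →
      (∀ t, a ≤ t → (rows.getD t []).length = min r (sizes.getD t 0).toNat) →
      ∃ rows',
        (List.range' a m).foldl (pvStepA sizes n players)
            (rows, min n (pvS sizes r + min a (pvK sizes r)))
          = (rows', min n (pvS sizes r + min (a+m) (pvK sizes r))) ∧
        rows'.length = rows.length ∧
        ∀ t, rows'.getD t [] =
          if a ≤ t ∧ t < a + m ∧ (r : Int) < sizes.getD t 0 ∧ pvS sizes r + t < n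
          then rows.getD t [] ++ [players.getD (pvS sizes r + t) ""]
          else rows.getD t [] := by
  intro m
  induction m with
  | zero =>
    intro a rows hlen hrows
    refine ⟨rows, rfl, rfl, ?_⟩
    intro t
    rw [if_neg]; rintro ⟨h1, h2, _⟩; omega
  | succ m ih =>
    intro a rows hlen hrows
    rw [List.range'_succ, List.foldl_cons]
    by_cases hopen : a < pvK sizes r
    · have hmin : min a (pvK sizes r) = a := by omega
      have hmin1 : min (a+1) (pvK sizes r) = a + 1 := by omega
      have halen : a < rows.length := by
        have := pvK_le_length sizes r; omega
      have hsz : (r : Int) < sizes.getD a 0 := (pvK_iff sizes hp r a).mpr hopen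
      by_cases hn : pvS sizes r + a < n
      · -- seat a is filled
        have hp_eq : min n (pvS sizes r + min a (pvK sizes r)) = pvS sizes r + a := by omega
        have hstep : pvStepA sizes n players (rows, min n (pvS sizes r + min a (pvK sizes r))) a
            = (rows.modify a (· ++ [players.getD (pvS sizes r + a) ""]), pvS sizes r + a + 1) := by
          unfold pvStepA
          rw [hp_eq]
          simp only
          rw [if_neg (by omega), if_pos (by rw [hrows a le_rfl]; exact (pv_open_iff r _).mpr hsz)]
        rw [hstep]
        have hpt : pvS sizes r + a + 1 = min n (pvS sizes r + min (a+1) (pvK sizes r)) := by omega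
        rw [hpt]
        obtain ⟨rows', heq, hlen', hget⟩ := ih (a+1)
          (rows.modify a (· ++ [players.getD (pvS sizes r + a) ""]))
          (by rw [List.length_modify]; exact hlen)
          (by
            intro t ht
            rw [pv_getD_modify_ne _ _ _ _ (by omega)]
            exact hrows t (by omega))
        refine ⟨rows', by rw [heq]; congr 1; omega, by rw [hlen', List.length_modify], ?_⟩
        intro t
        rw [hget t]
        by_cases hta : t = a
        · subst hta
          rw [if_neg (by rintro ⟨h1, _⟩; omega),
              pv_getD_modify_self _ _ _ halen,
              if_pos ⟨le_rfl, by omega, hsz, hn⟩]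
        · rw [pv_getD_modify_ne _ _ _ _ (Ne.symm hta)]
          by_cases hc : a ≤ t ∧ t < a + (m+1) ∧ (r : Int) < sizes.getD t 0 ∧ pvS sizes r + t < n
          · rw [if_pos ⟨by omega, by omega, hc.2.2⟩, if_pos hc]
          · rw [if_neg (by rintro ⟨h1, h2, h3, h4⟩; exact hc ⟨by omega, by omega, h3, h4⟩),
               if_neg hc]
      · -- the players are exhausted: pointer is saturated, nothing changes any more
        have hp_eq : min n (pvS sizes r + min a (pvK sizes r)) = n := by omega
        have hstep : pvStepA sizes n players (rows, min n (pvS sizes r + min a (pvK sizes r))) a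
            = (rows, min n (pvS sizes r + min (a+1) (pvK sizes r))) := by
          unfold pvStepA
          rw [hp_eq]
          simp only
          rw [if_pos (by omega)]
          congr 1
          omega
        rw [hstep]
        obtain ⟨rows', heq, hlen', hget⟩ := ih (a+1) rows hlen
          (fun t ht => hrows t (by omega))
        refine ⟨rows', by rw [heq]; congr 2; omega, hlen', ?_⟩
        intro t
        rw [hget t]
        by_cases hc : a + 1 ≤ t ∧ t < a + 1 + m ∧ (r : Int) < sizes.getD t 0 ∧ pvS sizes r + t < n
        · omega  -- impossible: pvS r + t ≥ pvS r + a ≥ n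
        · rw [if_neg hc, if_neg (by rintro ⟨h1, h2, h3, h4⟩; omega)]
    · -- table a is closed
      have hmin : min a (pvK sizes r) = pvK sizes r := by omega
      have hmin1 : min (a+1) (pvK sizes r) = pvK sizes r := by omega
      have hsz : ¬ ((r : Int) < sizes.getD a 0) := fun h => hopen ((pvK_iff sizes hp r a).mp h)
      have hstep : pvStepA sizes n players (rows, min n (pvS sizes r + min a (pvK sizes r))) a
          = (rows, min n (pvS sizes r + min (a+1) (pvK sizes r))) := by
        unfold pvStepA
        simp only
        rw [hmin, hmin1]
        by_cases hpn : min n (pvS sizes r + pvK sizes r) ≥ n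
        · rw [if_pos hpn]
        · rw [if_neg hpn, if_neg (by rw [hrows a le_rfl]; exact fun h => hsz ((pv_open_iff r _).mp h))]
      rw [hstep]
      obtain ⟨rows', heq, hlen', hget⟩ := ih (a+1) rows hlen (fun t ht => hrows t (by omega))
      refine ⟨rows', by rw [heq]; congr 2; omega, hlen', ?_⟩
      intro t
      rw [hget t]
      by_cases hta : t = a
      · subst hta
        rw [if_neg (by rintro ⟨h1, _⟩; omega), if_neg (by rintro ⟨_, _, h3, _⟩; exact hsz h3)]
      · by_cases hc : a + 1 ≤ t ∧ t < a + 1 + m ∧ (r : Int) < sizes.getD t 0 ∧ pvS sizes r + t < n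
        · rw [if_pos hc, if_pos ⟨by omega, by omega, hc.2.2.1, hc.2.2.2⟩]
        · rw [if_neg hc, if_neg (by rintro ⟨h1, h2, h3, h4⟩; exact hc ⟨by omega, by omega, h3, h4⟩)]

-- ===== the backward pass (round r odd): A's fold over (range b).reverse =====
theorem pv_passBwd (sizes : List Int) (n : Nat) (players : List String)
    (hp : sizes.Pairwise (fun a b => b ≤ a)) (r : Nat) :
    ∀ (b : Nat) (rows : List (List String)),
      rows.length = sizes.length →
      (∀ t, t < b → (rows.getD t []).length = min r (sizes.getD t 0).toNat) →
      ∃ rows',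
        ((List.range b).reverse).foldl (pvStepA sizes n players)
            (rows, min n (pvS sizes r + (pvK sizes r - min b (pvK sizes r))))
          = (rows', min n (pvS sizes r + pvK sizes r)) ∧
        rows'.length = rows.length ∧
        ∀ t, rows'.getD t [] =
          if t < b ∧ (r : Int) < sizes.getD t 0 ∧ pvS sizes r + (pvK sizes r - 1 - t) < n
          then rows.getD t [] ++ [players.getD (pvS sizes r + (pvK sizes r - 1 - t)) ""]
          else rows.getD t [] := by
  intro b
  induction b with
  | zero =>
    intro rows hlen hrows
    refine ⟨rows, ?_, rfl, ?_⟩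
    · simp only [List.range_zero, List.reverse_nil, List.foldl_nil]
      have h0 : pvK sizes r - min 0 (pvK sizes r) = pvK sizes r := by omega
      rw [h0]
    · intro t
      rw [if_neg]; rintro ⟨h1, _⟩; omega
  | succ b ih =>
    intro rows hlen hrows
    rw [List.range_succ, List.reverse_append, List.reverse_singleton, List.singleton_append,
        List.foldl_cons]
    by_cases hopen : b < pvK sizes r
    · have hmin : min (b+1) (pvK sizes r) = b + 1 := by omega
      have hminb : min b (pvK sizes r) = b := by omega
      have hblen : b < rows.length := by
        have := pvK_le_length sizes r; omega
      have hsz : (r : Int) < sizes.getD b 0 := (pvK_iff sizes hp r b).mpr hopen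
      by_cases hn : pvS sizes r + (pvK sizes r - 1 - b) < n
      · have hp_eq : min n (pvS sizes r + (pvK sizes r - min (b+1) (pvK sizes r)))
            = pvS sizes r + (pvK sizes r - 1 - b) := by omega
        have hstep : pvStepA sizes n players
            (rows, min n (pvS sizes r + (pvK sizes r - min (b+1) (pvK sizes r)))) b
            = (rows.modify b (· ++ [players.getD (pvS sizes r + (pvK sizes r - 1 - b)) ""]),
               min n (pvS sizes r + (pvK sizes r - min b (pvK sizes r)))) := by
          unfold pvStepA
          rw [hp_eq]
          simp only
          rw [if_neg (by omega), if_pos (by rw [hrows b (by omega)]; exact (pv_open_iff r _).mpr hsz)]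
          congr 1
          omega
        rw [hstep]
        obtain ⟨rows', heq, hlen', hget⟩ := ih
          (rows.modify b (· ++ [players.getD (pvS sizes r + (pvK sizes r - 1 - b)) ""]))
          (by rw [List.length_modify]; exact hlen)
          (by
            intro t ht
            rw [pv_getD_modify_ne _ _ _ _ (by omega)]
            exact hrows t (by omega))
        refine ⟨rows', heq, by rw [hlen', List.length_modify], ?_⟩
        intro t
        rw [hget t]
        by_cases htb : t = b
        · subst htb
          rw [if_neg (by rintro ⟨h1, _⟩; omega),
              pv_getD_modify_self _ _ _ hblen,
              if_pos ⟨by omega, hsz, hn⟩]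
        · rw [pv_getD_modify_ne _ _ _ _ (Ne.symm htb)]
          by_cases hc : t < b ∧ (r : Int) < sizes.getD t 0 ∧ pvS sizes r + (pvK sizes r - 1 - t) < n
          · rw [if_pos hc, if_pos ⟨by omega, hc.2.1, hc.2.2⟩]
          · rw [if_neg hc, if_neg (by rintro ⟨h1, h2, h3⟩; exact hc ⟨by omega, h2, h3⟩)]
      · have hp_eq : min n (pvS sizes r + (pvK sizes r - min (b+1) (pvK sizes r))) = n := by omega
        have hstep : pvStepA sizes n players
            (rows, min n (pvS sizes r + (pvK sizes r - min (b+1) (pvK sizes r)))) b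
            = (rows, min n (pvS sizes r + (pvK sizes r - min b (pvK sizes r)))) := by
          unfold pvStepA
          rw [hp_eq]
          simp only
          rw [if_pos (by omega)]
          congr 1
          omega
        rw [hstep]
        obtain ⟨rows', heq, hlen', hget⟩ := ih rows hlen (fun t ht => hrows t (by omega))
        refine ⟨rows', heq, hlen', ?_⟩
        intro t
        rw [hget t]
        by_cases hc : t < b ∧ (r : Int) < sizes.getD t 0 ∧ pvS sizes r + (pvK sizes r - 1 - t) < n
        · omega  -- impossible: offset for t < b is ≥ offset for b, which is ≥ n
        · rw [if_neg hc, if_neg (by rintro ⟨h1, h2, h3⟩; exact hc ⟨by omega, h2, h3⟩)]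
    · have hmin : min (b+1) (pvK sizes r) = pvK sizes r := by omega
      have hminb : min b (pvK sizes r) = pvK sizes r := by omega
      have hsz : ¬ ((r : Int) < sizes.getD b 0) := fun h => hopen ((pvK_iff sizes hp r b).mp h)
      have hstep : pvStepA sizes n players
          (rows, min n (pvS sizes r + (pvK sizes r - min (b+1) (pvK sizes r)))) b
          = (rows, min n (pvS sizes r + (pvK sizes r - min b (pvK sizes r)))) := by
        unfold pvStepA
        simp only
        rw [hmin, hminb]
        by_cases hpn : min n (pvS sizes r + (pvK sizes r - pvK sizes r)) ≥ n
        · rw [if_pos hpn]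
        · rw [if_neg hpn, if_neg (by rw [hrows b (by omega)]; exact fun h => hsz ((pv_open_iff r _).mp h))]
      rw [hstep]
      obtain ⟨rows', heq, hlen', hget⟩ := ih rows hlen (fun t ht => hrows t (by omega))
      refine ⟨rows', heq, hlen', ?_⟩
      intro t
      rw [hget t]
      by_cases htb : t = b
      · subst htb
        rw [if_neg (by rintro ⟨h1, _⟩; omega), if_neg (by rintro ⟨_, h2, _⟩; exact hsz h2)]
      · by_cases hc : t < b ∧ (r : Int) < sizes.getD t 0 ∧ pvS sizes r + (pvK sizes r - 1 - t) < n
        · rw [if_pos hc, if_pos ⟨by omega, hc.2.1, hc.2.2⟩]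
        · rw [if_neg hc, if_neg (by rintro ⟨h1, h2, h3⟩; exact hc ⟨by omega, h2, h3⟩)]

-- once every table is full, A's passes change nothing
theorem pv_foldA_noop (sizes : List Int) (n : Nat) (players : List String) :
    ∀ (idxs : List Nat) (st : List (List String) × Nat),
      (∀ t ∈ idxs, sizes.getD t 0 ≤ ((st.1.getD t []).length : Int)) →
      idxs.foldl (pvStepA sizes n players) st = st := by
  intro idxs
  induction idxs with
  | nil => intro st _; rfl
  | cons t rest ih =>
    intro st h
    rw [List.foldl_cons]
    have hstep : pvStepA sizes n players st t = st := by
      unfold pvStepA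
      by_cases hi : st.2 ≥ n
      · simp [hi]
      · simp [hi]; intro hc; exact absurd hc (not_lt.mpr (h t (by simp)))
    rw [hstep]
    exact ih st (fun t' ht' => h t' (by simp [ht']))

theorem pv_loopA_noop (sizes : List Int) (N n : Nat) (players : List String)
    (st : List (List String) × Nat)
    (h : ∀ t, t < N → sizes.getD t 0 ≤ ((st.1.getD t []).length : Int)) :
    ∀ fuel d, pvLoopA sizes N n players fuel d st = st.1 := by
  intro fuel
  induction fuel with
  | zero => intro d; rfl
  | succ fuel ih =>
    intro d
    unfold pvLoopA
    by_cases hi : st.2 < n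
    · rw [if_pos hi]
      have hfold : (if d then List.range N else (List.range N).reverse).foldl
          (pvStepA sizes n players) st = st := by
        apply pv_foldA_noop
        intro t ht
        apply h
        cases d <;> simp_all [List.mem_range]
      rw [hfold]
      exact ih (!d)
    · rw [if_neg hi]

theorem pv_parity (r : Nat) : (!decide (r % 2 = 0)) = decide ((r + 1) % 2 = 0) := by
  rcases Nat.mod_two_eq_zero_or_one r with h | h <;> simp [h, Nat.add_mod]

-- A's while-loop computes pvRowF at some stopping round
theorem pv_loopA_main (sizes : List Int) (n : Nat) (players : List String)
    (hp : sizes.Pairwise (fun a b => b ≤ a)) :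
    ∀ (fuel r : Nat) (st : List (List String) × Nat),
      st.1.length = sizes.length →
      st.2 = min n (pvS sizes r) →
      (∀ t, st.1.getD t [] = pvRowF sizes players n r t) →
      n ≤ fuel + pvS sizes r →
      ∃ r', pvStop sizes n r' ∧
        (pvLoopA sizes sizes.length n players fuel (decide (r % 2 = 0)) st).length = sizes.length ∧
        ∀ t, (pvLoopA sizes sizes.length n players fuel (decide (r % 2 = 0)) st).getD t []
          = pvRowF sizes players n r' t := by
  intro fuel
  induction fuel with
  | zero =>
    intro r st hlen hp2 hrows hfuel
    exact ⟨r, Or.inr (by omega), by simpa [pvLoopA] using hlen,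
      by simpa [pvLoopA] using hrows⟩
  | succ fuel ih =>
    intro r st hlen hp2 hrows hfuel
    by_cases hi : st.2 < n
    · have hSn : pvS sizes r < n := by omega
      have hlens : ∀ t, (st.1.getD t []).length = min r (sizes.getD t 0).toNat := by
        intro t
        rw [hrows t]
        exact pvRowF_length sizes players n hp t r hSn
      by_cases hK : pvK sizes r = 0
      · -- no table is open: the pass (and every later one) changes nothing
        have hfull : ∀ t, t < sizes.length →
            sizes.getD t 0 ≤ ((st.1.getD t []).length : Int) := by
          intro t _
          rw [hlens t]
          have := pvK_zero_le sizes hK t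
          omega
        have hres : pvLoopA sizes sizes.length n players (fuel+1) (decide (r % 2 = 0)) st
            = st.1 := by
          unfold pvLoopA
          rw [if_pos hi]
          rw [pv_foldA_noop sizes n players _ st (by
            intro t ht
            apply hfull
            split at ht <;> simp_all [List.mem_range])]
          exact pv_loopA_noop sizes sizes.length n players st hfull fuel _
        exact ⟨r, Or.inl hK, by rw [hres]; exact hlen, by rw [hres]; exact hrows⟩
      · -- a productive pass: apply the pass lemma of the round's direction, then recurse
        obtain ⟨rows0, p0⟩ := st
        simp only at hlen hp2 hrows hlens hi
        have hKle := pvK_le_length sizes r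
        have hS1 : pvS sizes (r+1) = pvS sizes r + pvK sizes r := rfl
        have hfuel' : n ≤ fuel + pvS sizes (r+1) := by omega
        by_cases hr : r % 2 = 0
        · obtain ⟨rows', heq, hlen', hget⟩ := pv_passFwd sizes n players hp r sizes.length 0
            rows0 hlen (fun t _ => hlens t)
          have hfold : (if decide (r % 2 = 0) then List.range sizes.length
              else (List.range sizes.length).reverse).foldl (pvStepA sizes n players) (rows0, p0)
              = (rows', min n (pvS sizes (r+1))) := by
            rw [if_pos (by simp [hr]), List.range_eq_range']
            have hst : p0 = min n (pvS sizes r + min 0 (pvK sizes r)) := by omega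
            rw [hst, heq]
            have : min n (pvS sizes r + min (0 + sizes.length) (pvK sizes r))
                = min n (pvS sizes (r+1)) := by rw [hS1]; omega
            rw [this]
          have hloop : pvLoopA sizes sizes.length n players (fuel+1) (decide (r % 2 = 0))
              (rows0, p0) = pvLoopA sizes sizes.length n players fuel (decide ((r+1) % 2 = 0))
              (rows', min n (pvS sizes (r+1))) := by
            conv_lhs => rw [pvLoopA]
            rw [if_pos hi, hfold, pv_parity]
          rw [hloop]
          apply ih (r+1) (rows', min n (pvS sizes (r+1)))
          · rw [hlen', hlen]
          · rfl
          · intro t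
            simp only
            rw [hget t, hrows t, pvRowF_succ]
            by_cases hbr : (r : Int) ≥ sizes.getD t 0
            · rw [if_pos hbr, if_neg (by rintro ⟨_, _, h3, _⟩; omega)]
            · have hopen : t < pvK sizes r := (pvK_iff sizes hp r t).mp (by omega)
              have hidx : pvIdx sizes r t = pvS sizes r + t := by simp [pvIdx, hr]
              rw [if_neg hbr, hidx]
              by_cases hn : pvS sizes r + t < n
              · rw [if_pos hn, if_pos ⟨by omega, by omega, by omega, hn⟩]
              · rw [if_neg hn, if_neg (by rintro ⟨_, _, _, h4⟩; omega)]
          · exact hfuel'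
        · obtain ⟨rows', heq, hlen', hget⟩ := pv_passBwd sizes n players hp r sizes.length
            rows0 hlen (fun t _ => hlens t)
          have hfold : (if decide (r % 2 = 0) then List.range sizes.length
              else (List.range sizes.length).reverse).foldl (pvStepA sizes n players) (rows0, p0)
              = (rows', min n (pvS sizes (r+1))) := by
            rw [if_neg (by simp [hr])]
            have hst : p0 = min n (pvS sizes r + (pvK sizes r - min sizes.length (pvK sizes r))) := by
              omega
            rw [hst, heq]
            rw [show min n (pvS sizes r + pvK sizes r) = min n (pvS sizes (r+1)) by rw [hS1]]
          have hloop : pvLoopA sizes sizes.length n players (fuel+1) (decide (r % 2 = 0))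
              (rows0, p0) = pvLoopA sizes sizes.length n players fuel (decide ((r+1) % 2 = 0))
              (rows', min n (pvS sizes (r+1))) := by
            conv_lhs => rw [pvLoopA]
            rw [if_pos hi, hfold, pv_parity]
          rw [hloop]
          apply ih (r+1) (rows', min n (pvS sizes (r+1)))
          · rw [hlen', hlen]
          · rfl
          · intro t
            simp only
            rw [hget t, hrows t, pvRowF_succ]
            by_cases hbr : (r : Int) ≥ sizes.getD t 0
            · rw [if_pos hbr, if_neg (by rintro ⟨_, h2, _⟩; omega)]
            · have hopen : t < pvK sizes r := (pvK_iff sizes hp r t).mp (by omega)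
              have hidx : pvIdx sizes r t = pvS sizes r + (pvK sizes r - 1 - t) := by
                simp [pvIdx, hr]
              rw [if_neg hbr, hidx]
              by_cases hn : pvS sizes r + (pvK sizes r - 1 - t) < n
              · rw [if_pos hn, if_pos ⟨by omega, by omega, hn⟩]
              · rw [if_neg hn, if_neg (by rintro ⟨_, _, h3⟩; omega)]
          · exact hfuel'
    · -- the players are all seated: the loop returns at once, round r is a stopping round
      refine ⟨r, Or.inr (by omega), ?_, ?_⟩
      · unfold pvLoopA
        rw [if_neg hi]
        exact hlen
      · unfold pvLoopA
        rw [if_neg hi]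
        exact hrows

-- Source B's `sum(1 for s in sizes if s > 0)` counts the tables open in round 0
theorem pv_counter_k0 : ∀ (l : List Int) (c : Int),
    l.foldl (fun a s => if 0 < s then a + 1 else a) c
      = c + (l.countP (fun s => decide ((0 : Int) < s)) : Int) := by
  intro l
  induction l with
  | nil => intro c; simp
  | cons x l ih =>
    intro c
    rw [List.foldl_cons, List.countP_cons, ih]
    by_cases hx : (0 : Int) < x
    · simp [hx]; push_cast; ring
    · simp [hx]

-- Source B's round-building loop produces exactly the pvS/pvK tables of the rounds until the stop
theorem pv_build_main (sizes : List Int) (n : Nat) :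
    ∀ (fuel r : Nat) (acc : List Int × List Int),
      n ≤ fuel + pvS sizes r →
      ∃ m, pvStop sizes n (r + m) ∧
        pvBuildRounds (PySem.Dict.counter sizes) n fuel ((pvK sizes r : Nat) : Int)
            ((pvS sizes r : Nat) : Int) (r : Int) acc
          = (acc.1 ++ (List.range' r m).map (fun j => ((pvS sizes j : Nat) : Int)),
             acc.2 ++ (List.range' r m).map (fun j => ((pvK sizes j : Nat) : Int))) := by
  intro fuel
  induction fuel with
  | zero =>
    intro r acc hfuel
    refine ⟨0, by rw [Nat.add_zero]; exact Or.inr (by omega), ?_⟩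
    simp only [pvBuildRounds, List.range'_zero, List.map_nil, List.append_nil]
  | succ fuel ih =>
    intro r acc hfuel
    by_cases hstop : pvK sizes r = 0 ∨ n ≤ pvS sizes r
    · refine ⟨0, by rwa [Nat.add_zero], ?_⟩
      unfold pvBuildRounds
      rw [if_neg (by
        rintro ⟨h1, h2⟩
        rcases hstop with h | h <;> omega)]
      simp only [List.range'_zero, List.map_nil, List.append_nil]
    · push_neg at hstop
      unfold pvBuildRounds
      rw [if_pos (by constructor <;> [omega; omega])]
      have hS1 : pvS sizes (r+1) = pvS sizes r + pvK sizes r := rfl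
      have hk' : ((pvK sizes r : Nat) : Int) - (PySem.Dict.counter sizes).getD ((r : Int) + 1) 0
          = ((pvK sizes (r+1) : Nat) : Int) := by
        rw [PySem.Dict.getD_counter]
        have := pvK_split sizes r
        push_cast
        omega
      have hs' : ((pvS sizes r : Nat) : Int) + ((pvK sizes r : Nat) : Int)
          = ((pvS sizes (r+1) : Nat) : Int) := by rw [hS1]; push_cast; ring
      have hr' : (r : Int) + 1 = ((r + 1 : Nat) : Int) := by push_cast; ring
      rw [hk', hs', hr']
      obtain ⟨m, hstop', heq⟩ := ih (r+1) (acc.1 ++ [((pvS sizes r : Nat) : Int)],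
        acc.2 ++ [((pvK sizes r : Nat) : Int)]) (by omega)
      refine ⟨m + 1, by rwa [show r + (m+1) = (r+1) + m by omega], ?_⟩
      rw [heq]
      have e1 : ∀ (xs : List Int) (x : Int) (ys : List Int),
          (xs ++ [x]) ++ ys = xs ++ (x :: ys) := by
        intro xs x ys
        rw [List.append_assoc, List.singleton_append]
      rw [List.range'_succ, List.map_cons, List.map_cons, e1, e1]

-- getD of a map over range' 0 m
theorem pv_getD_map_range' (f : Nat → Int) (m r : Nat) (hr : r < m) :
    (((List.range' 0 m).map f).getD r 0) = f r := by
  rw [List.getD_eq_getElem _ _ (by simpa using hr)]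
  simp

-- B's per-table fold over the round tables equals pvRowF
theorem pv_rowB_eq (sizes : List Int) (players : List String) (n : Nat)
    (hp : sizes.Pairwise (fun a b => b ≤ a)) (m t : Nat) :
    pvRowB players n ((List.range' 0 m).map (fun j => ((pvS sizes j : Nat) : Int)))
        ((List.range' 0 m).map (fun j => ((pvK sizes j : Nat) : Int)))
        (t : Int) (sizes.getD t 0)
      = pvRowF sizes players n m t := by
  unfold pvRowB pvRowF
  rw [show ((List.range' 0 m).map (fun j => ((pvS sizes j : Nat) : Int))).length = m by simp]
  apply PySem.List.foldl_congr_mem'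
  intro r hr row
  have hrm : r < m := by simpa [List.mem_range] using hr
  by_cases hbr : (r : Int) ≥ sizes.getD t 0
  · rw [if_pos hbr, if_pos hbr]
  · rw [if_neg hbr, if_neg hbr]
    have hopen : t < pvK sizes r := (pvK_iff sizes hp r t).mp (by omega)
    have hidx : ((List.range' 0 m).map (fun j => ((pvS sizes j : Nat) : Int))).getD r 0
        + (if r % 2 = 0 then (t : Int)
           else ((List.range' 0 m).map (fun j => ((pvK sizes j : Nat) : Int))).getD r 0 - 1 - t)
        = ((pvIdx sizes r t : Nat) : Int) := by
      rw [pv_getD_map_range' _ m r hrm, pv_getD_map_range' _ m r hrm]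
      unfold pvIdx
      by_cases hpar : r % 2 = 0
      · simp [hpar]
      · simp only [hpar, if_false]
        push_cast
        omega
    simp only [hidx]
    by_cases hn : pvIdx sizes r t < n
    · rw [if_pos (by exact_mod_cast hn), if_pos hn, Int.toNat_natCast]
    · rw [if_neg (by exact_mod_cast hn), if_neg hn]

-- ===== VERDICT (by name: the statement is the Claim_ definition above) =====
theorem distribute_snake_spec : Claim_equal_distribute_snake := by
  intro players table_sizes _
  unfold Spec_distribute_snake distribute_snake distribute_snake_alt
  have hp : (PySem.List.sorted table_sizes (fun x => x) true).Pairwise (fun a b => b ≤ a) := by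
    simpa using PySem.List.sorted_pairwise_rev table_sizes (fun x => x)
  -- A's side: the loop reaches a stopping round rA
  obtain ⟨rA, hstopA, hlenA, hgetA⟩ :=
    pv_loopA_main (PySem.List.sorted table_sizes (fun x => x) true) players.length players hp
      players.length 0
      ((List.replicate (PySem.List.sorted table_sizes (fun x => x) true).length
        ([] : List String)), 0)
      (by simp)
      (by simp [pvS])
      (by
        intro t
        simp only
        rw [show pvRowF (PySem.List.sorted table_sizes (fun x => x) true) players
            players.length 0 t = [] from rfl]
        by_cases ht : t < (PySem.List.sorted table_sizes (fun x => x) true).length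
        · rw [List.getD_eq_getElem _ _ (by simpa using ht)]
          simp
        · rw [List.getD_eq_default _ _ (by simpa using ht)])
      (by simp [pvS])
  rw [show decide ((0 : Nat) % 2 = 0) = true from rfl] at hgetA hlenA
  -- B's side: the dict is the counter, k0 is pvK 0, the build loop yields the pvS/pvK tables
  have hcnt : (PySem.List.sorted table_sizes (fun x => x) true).foldl
      (fun d s => d.insert s (d.getD s 0 + 1)) PySem.Dict.empty
      = PySem.Dict.counter (PySem.List.sorted table_sizes (fun x => x) true) :=
    PySem.Dict.foldl_insert_getD_add_one_eq_counter _
  have hk0 : (PySem.List.sorted table_sizes (fun x => x) true).foldl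
      (fun a s => if 0 < s then a + 1 else a) (0 : Int)
      = ((pvK (PySem.List.sorted table_sizes (fun x => x) true) 0 : Nat) : Int) := by
    rw [pv_counter_k0 _ 0, zero_add]
    unfold pvK
    norm_num
  obtain ⟨m, hstopB, hbuild⟩ :=
    pv_build_main (PySem.List.sorted table_sizes (fun x => x) true) players.length
      players.length 0 ([], []) (by simp [pvS])
  rw [Nat.zero_add] at hstopB
  simp only [show pvS (PySem.List.sorted table_sizes (fun x => x) true) 0 = 0 from rfl,
    Nat.cast_zero, List.nil_append] at hbuild
  -- the two stopping rounds give the same rows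
  have hsame : ∀ t, pvRowF (PySem.List.sorted table_sizes (fun x => x) true) players
        players.length rA t
      = pvRowF (PySem.List.sorted table_sizes (fun x => x) true) players players.length m t := by
    intro t
    have h1 := pvRowF_stable (PySem.List.sorted table_sizes (fun x => x) true) players
      players.length hstopA (Nat.le_max_left rA m) t
    have h2 := pvRowF_stable (PySem.List.sorted table_sizes (fun x => x) true) players
      players.length hstopB (Nat.le_max_right rA m) t
    rw [← h1, h2]
  -- assemble
  simp only [hcnt, hk0, hbuild]
  apply List.ext_getElem
  · rw [hlenA]
    simp [PySem.List.length_enumerate]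
  · intro t h1 h2
    have hlt : t < (PySem.List.sorted table_sizes (fun x => x) true).length := by
      rw [hlenA] at h1
      exact h1
    rw [show (pvLoopA (PySem.List.sorted table_sizes (fun x => x) true)
          (PySem.List.sorted table_sizes (fun x => x) true).length players.length players
          players.length true
          ((List.replicate (PySem.List.sorted table_sizes (fun x => x) true).length
            ([] : List String)), 0))[t]
        = (pvLoopA (PySem.List.sorted table_sizes (fun x => x) true)
          (PySem.List.sorted table_sizes (fun x => x) true).length players.length players
          players.length true
          ((List.replicate (PySem.List.sorted table_sizes (fun x => x) true).length
            ([] : List String)), 0)).getD t []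
        from (List.getD_eq_getElem _ _ h1).symm]
    rw [hgetA t, hsame t, List.getElem_map, PySem.List.getElem_enumerate]
    simp only [zero_add]
    rw [show (PySem.List.sorted table_sizes (fun x => x) true)[t]
        = (PySem.List.sorted table_sizes (fun x => x) true).getD t 0
        from (List.getD_eq_getElem _ 0 hlt).symm]
    exact (pv_rowB_eq (PySem.List.sorted table_sizes (fun x => x) true) players players.length
      hp m t).symm
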